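-- pv_equiv track=rewrite | github.com/ftsl575/teresa | spec_classifier/src/vendors/lenovo/parser.py | ordered_sheet_candidates
-- ===== SOURCE A (Python) =====
-- from typing import Dict, List, Optional, Sequence, Tuple
--
-- DCSC_EXCLUDED_SHEETS = frozenset(
--     {
--         "Power Report",
--         "ConfigGroupView",
--         "Summary",
--         "Message History",
--     }
-- )
--
-- def ordered_sheet_candidates(sheetnames: Sequence[str]) -> List[str]:
--     """Quote first, then Quote w availability, then other non-excluded sheets in workbook order."""
--     out: List[str] = []
--     seen: set = set()
--     if "Quote" in sheetnames:
--         out.append("Quote")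
--         seen.add("Quote")
--     if "Quote w availability" in sheetnames:
--         out.append("Quote w availability")
--         seen.add("Quote w availability")
--     for n in sheetnames:
--         if n in DCSC_EXCLUDED_SHEETS or n in seen:
--             continue
--         out.append(n)
--         seen.add(n)
--     return out
-- ===== SOURCE B (Python) =====
-- from typing import List, Sequence
--
-- DCSC_EXCLUDED_SHEETS = frozenset(
--     {
--         "Power Report",
--         "ConfigGroupView",
--         "Summary",
--         "Message History",
--     }
-- )
--
-- _PRIORITY = {"Quote": 0, "Quote w availability": 1}
--
--
-- def ordered_sheet_candidates(sheetnames: Sequence[str]) -> List[str]: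
--     """Quote first, then Quote w availability, then other non-excluded sheets in workbook order."""
--     uniq = [n for n in dict.fromkeys(sheetnames) if n not in DCSC_EXCLUDED_SHEETS]
--     return sorted(uniq, key=lambda n: _PRIORITY.get(n, 2))
-- ===== Notes on version B (the rewrite author's own statement) =====
-- stated objective: idiomatic
-- what changed: B replaces A's hand-maintained seen-set loop with two priority prechecks by a one-pass dedup (dict.fromkeys) filtered against the exclusion set, followed by a single stable sort keyed 0/1/2 that moves the two priority sheets to the front.
import Mathlib
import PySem

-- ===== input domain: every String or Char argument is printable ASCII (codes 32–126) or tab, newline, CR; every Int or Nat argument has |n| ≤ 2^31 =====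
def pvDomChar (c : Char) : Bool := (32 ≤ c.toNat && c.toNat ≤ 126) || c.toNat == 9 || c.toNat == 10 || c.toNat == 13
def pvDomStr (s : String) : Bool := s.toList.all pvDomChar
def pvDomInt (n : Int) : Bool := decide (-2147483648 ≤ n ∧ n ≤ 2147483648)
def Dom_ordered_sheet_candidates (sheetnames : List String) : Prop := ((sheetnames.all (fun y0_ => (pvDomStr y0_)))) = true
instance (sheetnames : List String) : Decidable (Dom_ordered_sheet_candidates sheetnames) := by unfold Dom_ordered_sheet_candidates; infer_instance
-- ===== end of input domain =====

-- B replaces A's seen-set loop with prechecks by dedup + filter + one stable sort keyed 0/1/2 (idiomatic; same return value, proved below).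

-- ===== PORT A =====
def DCSC_EXCLUDED_SHEETS : PySem.Set String :=
  PySem.Set.ofList ["Power Report", "ConfigGroupView", "Summary", "Message History"]

def ordered_sheet_candidates_st1 (sheetnames : List String) : List String × PySem.Set String :=
  -- out = []; seen = set(); the 'if "Quote" in sheetnames' block
  if sheetnames.contains "Quote" then
    ([] ++ ["Quote"], PySem.Set.add PySem.Set.empty "Quote")
  else ([], PySem.Set.empty)

def ordered_sheet_candidates_st2 (sheetnames : List String) : List String × PySem.Set String :=
  -- the 'if "Quote w availability" in sheetnames' block
  if sheetnames.contains "Quote w availability" then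
    ((ordered_sheet_candidates_st1 sheetnames).1 ++ ["Quote w availability"],
      PySem.Set.add (ordered_sheet_candidates_st1 sheetnames).2 "Quote w availability")
  else ordered_sheet_candidates_st1 sheetnames

def ordered_sheet_candidates (sheetnames : List String) : List String :=
  -- the for-loop over sheetnames, threading (out, seen)
  (sheetnames.foldl
    (fun acc n =>
      if DCSC_EXCLUDED_SHEETS.contains n || acc.2.contains n then acc
      else (acc.1 ++ [n], PySem.Set.add acc.2 n)) (ordered_sheet_candidates_st2 sheetnames)).1

-- ===== PORT B =====
def pvPriority : PySem.Dict String Int :=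
  PySem.Dict.ofList [("Quote", 0), ("Quote w availability", 1)]

def ordered_sheet_candidates_alt (sheetnames : List String) : List String :=
  PySem.List.sorted
    ((PySem.List.dedup sheetnames).filter (fun n => !(DCSC_EXCLUDED_SHEETS.contains n)))
    (fun n => pvPriority.getD n 2) false

-- ===== PRECONDITION & SPEC =====
def Spec_ordered_sheet_candidates (sheetnames : List String) (out : List String) : Prop := out = ordered_sheet_candidates_alt sheetnames
instance (sheetnames : List String) (out : List String) : Decidable (Spec_ordered_sheet_candidates sheetnames out) := by unfold Spec_ordered_sheet_candidates; infer_instance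

-- ===== CLAIM (what is proved, stated in full; the proofs are below) =====
def Claim_equal_ordered_sheet_candidates : Prop := ∀ (sheetnames : List String), Dom_ordered_sheet_candidates sheetnames → Spec_ordered_sheet_candidates sheetnames (ordered_sheet_candidates sheetnames)

-- ===== LEMMAS AND PROOFS =====

-- the rank key of B, spelt out
theorem rank_eq (n : String) :
    pvPriority.getD n 2 =
      (if n = "Quote" then 0 else if n = "Quote w availability" then 1 else 2) := by
  by_cases h1 : n = "Quote"
  · subst h1; decide
  · by_cases h2 : n = "Quote w availability"
    · subst h2; decide
    · simp [pvPriority, PySem.Dict.ofList, PySem.Dict.update, PySem.Dict.insert,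
        PySem.Dict.getD, PySem.Dict.get?, PySem.Dict.empty, h1, h2,
        beq_eq_false_iff_ne.mpr (fun h => h1 h.symm),
        beq_eq_false_iff_ne.mpr (fun h => h2 h.symm)]

-- insertBy inserts after a block it does not go before …
theorem insertBy_append_not_before {α : Type} (before : α → α → Bool) (x : α)
    (p q : List α) (h : ∀ y ∈ p, before x y = false) :
    PySem.List.insertBy before x (p ++ q) = p ++ PySem.List.insertBy before x q := by
  induction p with
  | nil => rfl
  | cons a p ih =>
    simp only [List.cons_append, PySem.List.insertBy, h a List.mem_cons_self]
    simp only [Bool.false_eq_true, if_false]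
    exact congrArg (a :: ·) (ih fun y hy => h y (List.mem_cons_of_mem a hy))

-- … and at the head of a block it goes entirely before
theorem insertBy_all_before {α : Type} (before : α → α → Bool) (x : α)
    (q : List α) (h : ∀ y ∈ q, before x y = true) :
    PySem.List.insertBy before x q = x :: q := by
  cases q with
  | nil => rfl
  | cons a q => simp [PySem.List.insertBy, h a List.mem_cons_self]

-- stable sort under a three-valued key = the three groups in workbook order
theorem sorted_three {α : Type} (key : α → Int)
    (hk : ∀ x, key x = 0 ∨ key x = 1 ∨ key x = 2) (xs : List α) :
    PySem.List.sorted xs key false =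
      xs.filter (fun x => key x == 0) ++ xs.filter (fun x => key x == 1) ++
        xs.filter (fun x => key x == 2) := by
  induction xs using List.reverseRecOn with
  | nil => rfl
  | append_singleton xs x ih =>
    have hfold : PySem.List.sorted (xs ++ [x]) key false =
        PySem.List.insertBy (fun a b => decide (key a < key b)) x
          (PySem.List.sorted xs key false) := by
      simp [PySem.List.sorted, List.foldl_append]
    rw [hfold, ih]
    have m0 : ∀ y ∈ xs.filter (fun x => key x == 0), key y = 0 := by
      intro y hy; simpa using (List.of_mem_filter hy)
    have m1 : ∀ y ∈ xs.filter (fun x => key x == 1), key y = 1 := by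
      intro y hy; simpa using (List.of_mem_filter hy)
    have m2 : ∀ y ∈ xs.filter (fun x => key x == 2), key y = 2 := by
      intro y hy; simpa using (List.of_mem_filter hy)
    rcases hk x with hx | hx | hx
    · rw [List.append_assoc,
        insertBy_append_not_before _ _ (xs.filter (fun x => key x == 0)) _
          (fun y hy => by simp [m0 y hy, hx]),
        insertBy_all_before _ _ _
          (fun y hy => by
            rcases List.mem_append.1 hy with h | h
            · simp [m1 y h, hx]
            · simp [m2 y h, hx])]
      simp [hx, List.filter_append]
    · rw [insertBy_append_not_before _ _
          (xs.filter (fun x => key x == 0) ++ xs.filter (fun x => key x == 1)) _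
          (fun y hy => by
            rcases List.mem_append.1 hy with h | h
            · simp [m0 y h, hx]
            · simp [m1 y h, hx]),
        insertBy_all_before _ _ _ (fun y hy => by simp [m2 y hy, hx])]
      simp [hx, List.filter_append]
    · rw [show xs.filter (fun x => key x == 0) ++ xs.filter (fun x => key x == 1) ++
            xs.filter (fun x => key x == 2) =
          (xs.filter (fun x => key x == 0) ++ xs.filter (fun x => key x == 1) ++
            xs.filter (fun x => key x == 2)) ++ ([] : List α) by simp,
        insertBy_append_not_before _ _ _ []
          (fun y hy => by
            rcases List.mem_append.1 hy with h | h
            · rcases List.mem_append.1 h with h' | h'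
              · simp [m0 y h', hx]
              · simp [m1 y h', hx]
            · simp [m2 y h, hx])]
      simp [hx, List.filter_append, PySem.List.insertBy]

-- A's for-loop: first component = the kept first occurrences not yet seen
theorem loopA_fst (l : List String) (out : List String) (s : PySem.Set String) :
    (l.foldl
      (fun acc n =>
        if DCSC_EXCLUDED_SHEETS.contains n || acc.2.contains n then acc
        else (acc.1 ++ [n], PySem.Set.add acc.2 n)) (out, s)).1
    = out ++ (PySem.Set.ofList l).filter
        (fun n => !decide (n ∈ DCSC_EXCLUDED_SHEETS) && !decide (n ∈ s)) := by
  induction l generalizing out s with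
  | nil => simp [PySem.Set.ofList]
  | cons n t ih =>
    rw [List.foldl_cons, PySem.Set.ofList_cons]
    by_cases hE : n ∈ DCSC_EXCLUDED_SHEETS
    · rw [if_pos (by simp [PySem.Set.contains, hE]), ih]
      have hd : (PySem.Set.discard (PySem.Set.ofList t) n).filter
          (fun m => !decide (m ∈ DCSC_EXCLUDED_SHEETS) && !decide (m ∈ s)) =
          (PySem.Set.ofList t).filter
          (fun m => !decide (m ∈ DCSC_EXCLUDED_SHEETS) && !decide (m ∈ s)) := by
        rw [PySem.Set.discard, List.filter_filter]
        refine List.filter_congr (fun m _ => ?_)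
        by_cases hm : m = n
        · subst hm; simp [hE]
        · simp [hm]
      simp [hE, hd]
    · by_cases hS : n ∈ s
      · rw [if_pos (by simp [PySem.Set.contains, hS]), ih]
        have hd : (PySem.Set.discard (PySem.Set.ofList t) n).filter
            (fun m => !decide (m ∈ DCSC_EXCLUDED_SHEETS) && !decide (m ∈ s)) =
            (PySem.Set.ofList t).filter
            (fun m => !decide (m ∈ DCSC_EXCLUDED_SHEETS) && !decide (m ∈ s)) := by
          rw [PySem.Set.discard, List.filter_filter]
          refine List.filter_congr (fun m _ => ?_)
          by_cases hm : m = n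
          · subst hm; simp [hS]
          · simp [hm]
        simp [hS, hd]
      · rw [if_neg (by simp [PySem.Set.contains, hE, hS]), ih]
        have hadd : PySem.Set.add s n = s ++ [n] :=
          PySem.Set.add_of_not_mem hS
        have hd : (PySem.Set.ofList t).filter
            (fun m => !decide (m ∈ DCSC_EXCLUDED_SHEETS) &&
              (!decide (m ∈ s) && !decide (m = n))) =
            (PySem.Set.discard (PySem.Set.ofList t) n).filter
            (fun m => !decide (m ∈ DCSC_EXCLUDED_SHEETS) && !decide (m ∈ s)) := by
          rw [PySem.Set.discard, List.filter_filter]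
          refine List.filter_congr (fun m _ => ?_)
          by_cases hm : m = n
          · subst hm; simp
          · simp [hm]
        simp [hE, hS, List.append_assoc, hd]

-- a Nodup list filtered down to one value
theorem filter_eq_single_of_nodup {α : Type} [DecidableEq α] (l : List α) (hl : l.Nodup)
    (a : α) : l.filter (fun x => x == a) = if a ∈ l then [a] else [] := by
  induction l with
  | nil => simp
  | cons b t ih =>
    rcases List.nodup_cons.1 hl with ⟨hb, ht⟩
    by_cases hba : b = a
    · subst hba
      simp [ih ht, hb]
    · simp [hba, ih ht, Ne.symm hba]

-- B unravelled into the three groups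
theorem altB_eq (l : List String) :
    ordered_sheet_candidates_alt l =
      (if "Quote" ∈ l then ["Quote"] else []) ++
      (if "Quote w availability" ∈ l then ["Quote w availability"] else []) ++
      (PySem.Set.ofList l).filter
        (fun n => !decide (n ∈ DCSC_EXCLUDED_SHEETS) &&
                  (!decide (n = "Quote") && !decide (n = "Quote w availability"))) := by
  have hk : ∀ n : String, pvPriority.getD n 2 = 0 ∨ pvPriority.getD n 2 = 1 ∨
      pvPriority.getD n 2 = 2 := by
    intro n; rw [rank_eq]; split_ifs <;> simp
  rw [ordered_sheet_candidates_alt, PySem.List.dedup, sorted_three _ hk]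
  congr 1
  · congr 1
    · rw [List.filter_filter]
      rw [List.filter_congr (q := fun n => n == "Quote") (fun n _ => by
        by_cases hn : n = "Quote"
        · subst hn; simp [rank_eq]; decide
        · rw [rank_eq, if_neg hn]; split_ifs <;> simp [hn])]
      rw [filter_eq_single_of_nodup _ (PySem.Set.nodup_ofList l)]
      simp [PySem.Set.mem_ofList]
    · rw [List.filter_filter]
      rw [List.filter_congr (q := fun n => n == "Quote w availability") (fun n _ => by
        by_cases hn : n = "Quote w availability"
        · subst hn; simp [rank_eq]; decide
        · rw [rank_eq]; split_ifs <;> simp [hn])]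
      rw [filter_eq_single_of_nodup _ (PySem.Set.nodup_ofList l)]
      simp [PySem.Set.mem_ofList]
  · rw [List.filter_filter]
    refine List.filter_congr (fun n _ => ?_)
    by_cases h1 : n = "Quote"
    · subst h1; simp [rank_eq]
    · by_cases h2 : n = "Quote w availability"
      · subst h2; simp [rank_eq]
      · simp [rank_eq, h1, h2]

-- ===== VERDICT (by name: the statement is the Claim_ definition above) =====
theorem ordered_sheet_candidates_spec : Claim_equal_ordered_sheet_candidates := by
  intro l _
  unfold Spec_ordered_sheet_candidates
  rw [altB_eq]
  unfold ordered_sheet_candidates ordered_sheet_candidates_st2 ordered_sheet_candidates_st1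
  by_cases hQ : "Quote" ∈ l
  · by_cases hA : "Quote w availability" ∈ l
    · simp only [hQ, hA, decide_true, if_true, List.contains_eq_mem]
      rw [loopA_fst,
        show ((PySem.Set.empty.add "Quote").add "Quote w availability" : PySem.Set String) =
          ["Quote", "Quote w availability"] from rfl,
        List.filter_congr (l := PySem.Set.ofList l)
          (q := fun n => !decide (n ∈ DCSC_EXCLUDED_SHEETS) &&
            (!decide (n = "Quote") && !decide (n = "Quote w availability")))
          (fun n _ => by
            by_cases h1 : n = "Quote"
            · subst h1; simp
            · by_cases h2 : n = "Quote w availability"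
              · subst h2; simp
              · simp [h1, h2])]
      simp
    · simp only [hQ, hA, decide_true, decide_false, if_true, if_false, Bool.false_eq_true, List.contains_eq_mem]
      rw [loopA_fst,
        show (PySem.Set.empty.add "Quote" : PySem.Set String) = ["Quote"] from rfl,
        List.filter_congr (l := PySem.Set.ofList l)
          (q := fun n => !decide (n ∈ DCSC_EXCLUDED_SHEETS) &&
            (!decide (n = "Quote") && !decide (n = "Quote w availability")))
          (fun n hn => by
            have hnl : n ∈ l := by simpa using hn
            by_cases h1 : n = "Quote"
            · subst h1; simp
            · have h2 : ¬ n = "Quote w availability" := fun h => hA (h ▸ hnl)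
              simp [h1, h2])]
      simp
  · by_cases hA : "Quote w availability" ∈ l
    · simp only [hQ, hA, decide_true, decide_false, if_true, if_false, Bool.false_eq_true, List.contains_eq_mem]
      rw [loopA_fst,
        show (PySem.Set.empty.add "Quote w availability" : PySem.Set String) =
          ["Quote w availability"] from rfl,
        List.filter_congr (l := PySem.Set.ofList l)
          (q := fun n => !decide (n ∈ DCSC_EXCLUDED_SHEETS) &&
            (!decide (n = "Quote") && !decide (n = "Quote w availability")))
          (fun n hn => by
            have hnl : n ∈ l := by simpa using hn
            have h1 : ¬ n = "Quote" := fun h => hQ (h ▸ hnl)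
            by_cases h2 : n = "Quote w availability"
            · subst h2; simp
            · simp [h1, h2])]
    · simp only [hQ, hA, decide_false, if_false, Bool.false_eq_true, List.contains_eq_mem]
      rw [loopA_fst,
        List.filter_congr (l := PySem.Set.ofList l)
          (q := fun n => !decide (n ∈ DCSC_EXCLUDED_SHEETS) &&
            (!decide (n = "Quote") && !decide (n = "Quote w availability")))
          (fun n hn => by
            have hnl : n ∈ l := by simpa using hn
            have h1 : ¬ n = "Quote" := fun h => hQ (h ▸ hnl)
            have h2 : ¬ n = "Quote w availability" := fun h => hA (h ▸ hnl)
            simp [h1, h2])]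
      simp
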